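-- pv_equiv track=rewrite | github.com/yfzzzyyls/Design_and_Verification_Projects | prepare_calibre_extract_source.py | parse_shell_subckts_from_spi
-- ===== SOURCE A (Python) =====
-- from typing import List, Set, Tuple
--
-- def parse_shell_subckts_from_spi(text: str, drop_pins: Set[str]) -> List[Tuple[str, List[str]]]:
--     subckts: List[Tuple[str, List[str]]] = []
--     lines = text.splitlines()
--     i = 0
--     while i < len(lines):
--         line = lines[i].strip()
--         if not line.lower().startswith(".subckt "):
--             i += 1
--             continue
--         header = line
--         i += 1
--         while i < len(lines) and lines[i].lstrip().startswith("+"):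
--             header += " " + lines[i].lstrip()[1:].strip()
--             i += 1
--         tokens = header.split()
--         if len(tokens) >= 2:
--             name = tokens[1]
--             pins = [tok for tok in tokens[2:] if tok not in drop_pins]
--             subckts.append((name, pins))
--     return subckts
-- ===== SOURCE B (Python) =====
-- from typing import List, Set, Tuple
--
-- def parse_shell_subckts_from_spi(text: str, drop_pins: Set[str]) -> List[Tuple[str, List[str]]]:
--     # Pass 1: fold physical lines into logical lines; a logical line keeps the
--     # (stripped) opening card and the merged continuation text separately, since
--     # SPICE directives are recognized on the opening card.
--     logical: List[List[str]] = []
--     for raw in text.splitlines():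
--         ls = raw.lstrip()
--         if ls.startswith("+"):
--             if logical:
--                 logical[-1][1] += " " + ls[1:].strip()
--             # a continuation card with no preceding card is ignored
--         else:
--             logical.append([raw.strip(), ""])
--     # Pass 2: parse the .subckt headers among the logical lines.
--     out: List[Tuple[str, List[str]]] = []
--     for head, cont in logical:
--         if head.lower().startswith(".subckt "):
--             tokens = (head + cont).split()
--             if len(tokens) >= 2:
--                 out.append((tokens[1], [t for t in tokens[2:] if t not in drop_pins]))
--     return out
-- ===== Notes on version B (the rewrite author's own statement) =====
-- stated objective: alternative
-- what changed: Replaces A's single index-driven while loop with a nested continuation-eating inner loop by two separate passes: a fold that merges '+'-continuation cards into logical lines, then a scan that parses the .subckt headers among the logical lines.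
import Mathlib
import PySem

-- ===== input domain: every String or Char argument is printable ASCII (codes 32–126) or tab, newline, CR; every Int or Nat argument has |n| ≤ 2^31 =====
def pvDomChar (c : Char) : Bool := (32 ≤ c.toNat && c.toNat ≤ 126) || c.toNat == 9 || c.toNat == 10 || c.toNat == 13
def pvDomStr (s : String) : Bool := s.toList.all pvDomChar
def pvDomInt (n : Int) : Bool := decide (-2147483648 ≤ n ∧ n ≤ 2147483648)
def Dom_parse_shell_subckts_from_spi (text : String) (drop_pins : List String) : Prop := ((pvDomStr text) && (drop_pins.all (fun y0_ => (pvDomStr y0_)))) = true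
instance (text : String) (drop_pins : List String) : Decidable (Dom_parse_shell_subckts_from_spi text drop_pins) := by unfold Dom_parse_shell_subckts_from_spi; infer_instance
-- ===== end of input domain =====

-- B replaces A's index-driven while loop (with a nested continuation-eating while)
-- by two separate passes: one fold that merges '+'-continuation cards into logical
-- lines, then a scan that parses the .subckt headers among the logical lines.

-- ===== PORT A =====
-- the continuation piece a '+' card contributes: lines[i].lstrip()[1:].strip()
def pvPiece (l : String) : String :=
  PySem.Str.strip (PySem.Str.slice (PySem.Str.lstrip l) (some 1) none)

-- inner while: consume leading '+' cards, extending the header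
def pvA_eat (header : String) (ls : List String) : String × List String :=
  match ls with
  | [] => (header, [])
  | l :: rest =>
      if PySem.Str.startswith (PySem.Str.lstrip l) "+" then
        pvA_eat (header ++ (" " ++ pvPiece l)) rest
      else (header, l :: rest)

theorem pvA_eat_len (header : String) (ls : List String) :
    (pvA_eat header ls).2.length ≤ ls.length := by
  induction ls generalizing header with
  | nil => simp [pvA_eat]
  | cons l rest ih =>
      simp only [pvA_eat]
      split
      · exact le_trans (ih _) (by simp)
      · simp

-- outer while over the line index
def pvA_go (drop_pins : List String) (subckts : List (String × List String))
    (ls : List String) : List (String × List String) :=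
  match ls with
  | [] => subckts
  | l :: rest =>
      let line := PySem.Str.strip l
      if !(PySem.Str.startswith (PySem.Str.lower line) ".subckt ") then
        pvA_go drop_pins subckts rest
      else
        pvA_go drop_pins
          (if 2 ≤ (PySem.Str.split₀ (pvA_eat line rest).1).length then
            subckts ++ [((PySem.List.pyGet? (PySem.Str.split₀ (pvA_eat line rest).1) 1).getD "",
              (PySem.List.slice (PySem.Str.split₀ (pvA_eat line rest).1) (some 2) none).filter
                (fun t => !(drop_pins.contains t)))]
          else subckts)
          (pvA_eat line rest).2
termination_by ls.length
decreasing_by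
  all_goals first
    | (exact Nat.lt_succ_of_le (pvA_eat_len _ _))
    | simp

def parse_shell_subckts_from_spi (text : String) (drop_pins : List String) : List (String × List String) :=
  pvA_go drop_pins [] (PySem.Str.splitlines text)

-- ===== PORT B =====
-- pass 1: fold a physical card onto the logical-line list
-- (a logical line = (stripped opening card, merged continuation text))
def pvB_fold (acc : List (String × String)) (raw : String) : List (String × String) :=
  if PySem.Str.startswith (PySem.Str.lstrip raw) "+" then
    match acc.getLast? with
    | none => acc
    | some hc => acc.dropLast ++ [(hc.1, hc.2 ++ (" " ++ pvPiece raw))]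
  else acc ++ [(PySem.Str.strip raw, "")]

-- pass 2: parse one logical line, appending to the output
def pvB_emit (drop_pins : List String) (out : List (String × List String))
    (hc : String × String) : List (String × List String) :=
  if PySem.Str.startswith (PySem.Str.lower hc.1) ".subckt " then
    if 2 ≤ (PySem.Str.split₀ (hc.1 ++ hc.2)).length then
      out ++ [((PySem.List.pyGet? (PySem.Str.split₀ (hc.1 ++ hc.2)) 1).getD "",
        (PySem.List.slice (PySem.Str.split₀ (hc.1 ++ hc.2)) (some 2) none).filter
          (fun t => !(drop_pins.contains t)))]
    else out
  else out

def parse_shell_subckts_from_spi_alt (text : String) (drop_pins : List String) : List (String × List String) :=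
  (((PySem.Str.splitlines text).foldl pvB_fold []).foldl (pvB_emit drop_pins) [])

-- ===== PRECONDITION & SPEC =====
def Spec_parse_shell_subckts_from_spi (text : String) (drop_pins : List String) (out : List (String × List String)) : Prop := out = parse_shell_subckts_from_spi_alt text drop_pins
instance (text : String) (drop_pins : List String) (out : List (String × List String)) : Decidable (Spec_parse_shell_subckts_from_spi text drop_pins out) := by unfold Spec_parse_shell_subckts_from_spi; infer_instance

-- ===== CLAIM (what is proved, stated in full; the proofs are below) =====
def Claim_equal_parse_shell_subckts_from_spi : Prop := ∀ (text : String) (drop_pins : List String), Dom_parse_shell_subckts_from_spi text drop_pins → Spec_parse_shell_subckts_from_spi text drop_pins (parse_shell_subckts_from_spi text drop_pins)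

-- ===== LEMMAS AND PROOFS =====

-- a card whose lstrip starts with '+' can never be a .subckt header
theorem pv_plus_not_header (l : String)
    (h : PySem.Str.startswith (PySem.Str.lstrip l) "+" = true) :
    PySem.Str.startswith (PySem.Str.lower (PySem.Str.strip l)) ".subckt " = false := by
  have h1 : ['+'] <+: PySem.Chars.lstrip l.toList := by
    rw [← PySem.Chars.startswith_iff]
    rw [show PySem.Chars.startswith (PySem.Chars.lstrip l.toList) ['+']
          = PySem.Str.startswith (PySem.Str.lstrip l) "+" by simp]
    exact h
  obtain ⟨t, ht⟩ := h1
  rw [List.singleton_append] at ht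
  apply Bool.eq_false_iff.mpr
  intro hcon
  have h2 : (".subckt ".toList) <+: PySem.Chars.lower (PySem.Chars.strip l.toList) := by
    rw [← PySem.Chars.startswith_iff]
    rw [show PySem.Chars.startswith (PySem.Chars.lower (PySem.Chars.strip l.toList)) ".subckt ".toList
          = PySem.Str.startswith (PySem.Str.lower (PySem.Str.strip l)) ".subckt " by simp]
    exact hcon
  have hr : PySem.Chars.strip l.toList = List.rdropWhile PySem.Chars.isspace ('+'::t) := by
    simp [PySem.Chars.strip, PySem.Chars.rstrip, List.rdropWhile, ← ht]
  have hne : List.rdropWhile PySem.Chars.isspace ('+'::t) ≠ [] := by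
    rw [Ne, List.rdropWhile_eq_nil_iff]
    intro hall
    have h3 := hall '+' (by simp)
    exact absurd h3 (by decide)
  obtain ⟨c, u, hcu⟩ : ∃ c u, List.rdropWhile PySem.Chars.isspace ('+'::t) = c :: u := by
    cases hx : List.rdropWhile PySem.Chars.isspace ('+'::t) with
    | nil => exact absurd hx hne
    | cons c u => exact ⟨c, u, rfl⟩
  have hpre := List.rdropWhile_prefix PySem.Chars.isspace ('+'::t)
  rw [hcu] at hpre
  have hc : c = '+' := (List.cons_prefix_cons.mp hpre).1
  rw [hr, hcu, hc] at h2
  rw [show (".subckt ".toList) = '.' :: ".subckt ".toList.tail by decide] at h2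
  rw [show PySem.Chars.lower ('+'::u) = '+' :: PySem.Chars.lower u by
    simp [PySem.Chars.lower]; decide] at h2
  exact absurd (List.cons_prefix_cons.mp h2).1 (by decide)

-- eating appends pieces independently of the header accumulator
theorem pvA_eat_shift (ls : List String) (s t : String) :
    pvA_eat (s ++ t) ls = (s ++ (pvA_eat t ls).1, (pvA_eat t ls).2) := by
  induction ls generalizing t with
  | nil => simp [pvA_eat]
  | cons l rest ih =>
      simp only [pvA_eat]
      split
      · rw [show (s ++ t) ++ (" " ++ pvPiece l) = s ++ (t ++ (" " ++ pvPiece l)) by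
          simp [String.append_assoc]]
        exact ih _
      · simp

theorem pvA_eat_shift' (ls : List String) (s : String) :
    pvA_eat s ls = (s ++ (pvA_eat "" ls).1, (pvA_eat "" ls).2) := by
  have := pvA_eat_shift ls s ""
  simpa using this

-- after eating, the remaining lines do not start with a '+' card
def pvNoPlus (ls : List String) : Bool :=
  match ls with
  | [] => true
  | l :: _ => !(PySem.Str.startswith (PySem.Str.lstrip l) "+")

theorem pvA_eat_stop (header : String) (ls : List String) :
    pvNoPlus (pvA_eat header ls).2 = true := by
  induction ls generalizing header with
  | nil => simp [pvA_eat, pvNoPlus]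
  | cons l rest ih =>
      simp only [pvA_eat]
      split
      · exact ih _
      · simp_all [pvNoPlus]

-- accumulator lemma for A's outer loop
theorem pvA_go_acc_aux (n : Nat) : ∀ (ls : List String), ls.length ≤ n →
    ∀ (d : List String) (acc : List (String × List String)),
    pvA_go d acc ls = acc ++ pvA_go d [] ls := by
  induction n with
  | zero =>
      intro ls hls d acc
      have : ls = [] := List.eq_nil_of_length_eq_zero (Nat.le_zero.mp hls)
      subst this; simp [pvA_go]
  | succ n ih =>
      intro ls hls d acc
      match ls with
      | [] => simp [pvA_go]
      | l :: rest =>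
          rw [pvA_go, pvA_go]
          split
          · exact ih rest (by simp at hls; omega) d acc
          · have hlen : (pvA_eat (PySem.Str.strip l) rest).2.length ≤ n :=
              le_trans (pvA_eat_len _ _) (by simp at hls; omega)
            split
            · conv_rhs => rw [ih _ hlen d]
              rw [ih _ hlen d]
              simp [List.append_assoc]
            · rw [ih _ hlen d]

theorem pvA_go_acc (d : List String) (acc : List (String × List String)) (ls : List String) :
    pvA_go d acc ls = acc ++ pvA_go d [] ls :=
  pvA_go_acc_aux ls.length ls le_rfl d acc

-- B's fold over a '+'-run acts exactly like A's eat on the last logical line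
theorem pvB_fold_plus (ls : List String) (p : List (String × String)) (h c : String) :
    ls.foldl pvB_fold (p ++ [(h, c)]) =
      (pvA_eat c ls).2.foldl pvB_fold (p ++ [(h, (pvA_eat c ls).1)]) := by
  induction ls generalizing c with
  | nil => simp [pvA_eat]
  | cons l rest ih =>
      rw [List.foldl_cons]
      by_cases hp : PySem.Str.startswith (PySem.Str.lstrip l) "+" = true
      · have hq : PySem.Chars.startswith (PySem.Chars.lstrip l.toList) ['+'] = true := by
          rw [show PySem.Chars.startswith (PySem.Chars.lstrip l.toList) ['+']
                = PySem.Str.startswith (PySem.Str.lstrip l) "+" by simp]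
          exact hp
        rw [show pvB_fold (p ++ [(h, c)]) l = p ++ [(h, c ++ (" " ++ pvPiece l))] by
            simp [pvB_fold, hq]]
        rw [ih]
        simp [pvA_eat, hq]
      · have hq : PySem.Chars.startswith (PySem.Chars.lstrip l.toList) ['+'] = false := by
          rw [show PySem.Chars.startswith (PySem.Chars.lstrip l.toList) ['+']
                = PySem.Str.startswith (PySem.Str.lstrip l) "+" by simp]
          exact eq_false_of_ne_true hp
        rw [show pvB_fold (p ++ [(h, c)]) l = (p ++ [(h, c)]) ++ [(PySem.Str.strip l, "")] by
            simp [pvB_fold, hq]]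
        conv_rhs => rw [show pvA_eat c (l :: rest) = (c, l :: rest) by
            simp [pvA_eat, hq]]
        rw [List.foldl_cons]
        rw [show pvB_fold (p ++ [(h, c)]) l = (p ++ [(h, c)]) ++ [(PySem.Str.strip l, "")] by
            simp [pvB_fold, hq]]

-- the last logical line so far is not a header (or there is none yet)
def pvLastOk (p : List (String × String)) : Bool :=
  match p.getLast? with
  | none => true
  | some hc => !(PySem.Str.startswith (PySem.Str.lower hc.1) ".subckt ")

set_option maxHeartbeats 2000000 in
-- main invariant: parsing B's logical lines built from `p` then `lines`
-- yields the parse of `p` followed by whatever A's loop emits on `lines`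
theorem pv_main (d : List String) (n : Nat) : ∀ (lines : List String), lines.length ≤ n →
    ∀ (p : List (String × String)), (pvNoPlus lines = true ∨ pvLastOk p = true) →
    ((lines.foldl pvB_fold p).foldl (pvB_emit d) [])
      = p.foldl (pvB_emit d) [] ++ pvA_go d [] lines := by
  induction n with
  | zero =>
      intro lines hl p _
      have : lines = [] := List.eq_nil_of_length_eq_zero (Nat.le_zero.mp hl)
      subst this; simp [pvA_go]
  | succ n ih =>
      intro lines hl p hok
      match lines with
      | [] => simp [pvA_go]
      | l :: rest =>
          have hrest : rest.length ≤ n := by simp at hl; omega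
          rw [List.foldl_cons]
          by_cases hp : PySem.Str.startswith (PySem.Str.lstrip l) "+" = true
          · -- a '+' card: A skips it (it is no header), B merges it into a non-header line
            have hpc : PySem.Chars.startswith (PySem.Chars.lstrip l.toList) ['+'] = true := by
              simpa using hp
            have hnh := pv_plus_not_header l hp
            have hlast : pvLastOk p = true := by
              rcases hok with hok | hok
              · exfalso
                simp [pvNoPlus] at hok
                simp only [PySem.Str.startswith_eq] at hp
                simp at hp
                rw [hok] at hp
                exact Bool.false_ne_true hp
              · exact hok
            have hnh' : PySem.Chars.startswith (PySem.Chars.lower (PySem.Chars.strip l.toList))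
                ['.','s','u','b','c','k','t',' '] = false := by simpa using hnh
            rw [show pvA_go d [] (l :: rest) = pvA_go d [] rest by
              rw [pvA_go]; simp [hnh']]
            cases hgl : p.getLast? with
            | none =>
                have hpnil : p = [] := by
                  cases p with
                  | nil => rfl
                  | cons a as => simp at hgl
                subst hpnil
                rw [show pvB_fold [] l = [] by simp [pvB_fold, hpc]]
                exact ih rest hrest [] (Or.inr rfl)
            | some hc =>
                obtain ⟨q, hq⟩ := List.getLast?_eq_some_iff.mp hgl
                have hh0' : PySem.Chars.startswith (PySem.Chars.lower hc.1.toList)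
                    ['.','s','u','b','c','k','t',' '] = false := by
                  simpa [pvLastOk, hgl] using hlast
                have hh0 : PySem.Str.startswith (PySem.Str.lower hc.1) ".subckt " = false := by
                  simpa using hh0'
                subst hq
                rw [show pvB_fold (q ++ [hc]) l
                      = q ++ [(hc.1, hc.2 ++ (" " ++ pvPiece l))] by
                  simp [pvB_fold, hpc]]
                rw [ih rest hrest _ (Or.inr (by simp [pvLastOk, hh0']))]
                have hfold : List.foldl (pvB_emit d) [] (q ++ [(hc.1, hc.2 ++ (" " ++ pvPiece l))])
                    = List.foldl (pvB_emit d) [] (q ++ [hc]) := by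
                  rw [List.foldl_append, List.foldl_append]
                  simp [pvB_emit, hh0']
                rw [hfold]
          · -- an ordinary card: B opens a new logical line
            have hpc : PySem.Chars.startswith (PySem.Chars.lstrip l.toList) ['+'] = false := by
              simpa using eq_false_of_ne_true hp
            rw [show pvB_fold p l = p ++ [(PySem.Str.strip l, "")] by
              simp [pvB_fold, hpc]]
            by_cases hh : PySem.Str.startswith (PySem.Str.lower (PySem.Str.strip l)) ".subckt " = true
            · -- a header: A eats the following '+' cards; B folds them into the same logical line
              have heat := pvB_fold_plus rest p (PySem.Str.strip l) ""
              rw [heat]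
              have hlen2 : (pvA_eat "" rest).2.length ≤ n :=
                le_trans (pvA_eat_len _ _) hrest
              rw [ih _ hlen2 _ (Or.inl (pvA_eat_stop "" rest))]
              rw [show pvA_go d [] (l :: rest)
                    = (if 2 ≤ (PySem.Str.split₀ (pvA_eat (PySem.Str.strip l) rest).1).length then
                        [((PySem.List.pyGet? (PySem.Str.split₀ (pvA_eat (PySem.Str.strip l) rest).1) 1).getD "",
                          (PySem.List.slice (PySem.Str.split₀ (pvA_eat (PySem.Str.strip l) rest).1) (some 2) none).filter
                            (fun t => !(d.contains t)))]
                      else []) ++ pvA_go d [] (pvA_eat (PySem.Str.strip l) rest).2 by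
                rw [pvA_go]
                simp only [hh, Bool.not_true, Bool.false_eq_true, if_false]
                rw [pvA_go_acc]
                split <;> simp]
              rw [pvA_eat_shift' rest (PySem.Str.strip l)]
              rw [List.foldl_append]
              simp only [List.foldl_cons, List.foldl_nil]
              rw [show ∀ out, pvB_emit d out (PySem.Str.strip l, (pvA_eat "" rest).1)
                    = out ++ (if 2 ≤ (PySem.Str.split₀ (PySem.Str.strip l ++ (pvA_eat "" rest).1)).length then
                        [((PySem.List.pyGet? (PySem.Str.split₀ (PySem.Str.strip l ++ (pvA_eat "" rest).1)) 1).getD "",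
                          (PySem.List.slice (PySem.Str.split₀ (PySem.Str.strip l ++ (pvA_eat "" rest).1)) (some 2) none).filter
                            (fun t => !(d.contains t)))]
                      else []) from fun out => by
                have hhc : PySem.Chars.startswith (PySem.Chars.lower (PySem.Chars.strip l.toList))
                    ['.','s','u','b','c','k','t',' '] = true := by simpa using hh
                simp [pvB_emit, hhc]
                split <;> simp]
              simp [List.append_assoc]
            · -- not a header: A skips the card, B parses the new logical line to nothing
              have hh' : PySem.Str.startswith (PySem.Str.lower (PySem.Str.strip l)) ".subckt " = false :=
                eq_false_of_ne_true hh
              have hh'' : PySem.Chars.startswith (PySem.Chars.lower (PySem.Chars.strip l.toList))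
                  ['.','s','u','b','c','k','t',' '] = false := by simpa using hh'
              rw [show pvA_go d [] (l :: rest) = pvA_go d [] rest by
                rw [pvA_go]; simp [hh'']]
              rw [ih rest hrest _ (Or.inr (by simp [pvLastOk, hh'']))]
              have hfold : List.foldl (pvB_emit d) [] (p ++ [(PySem.Str.strip l, "")])
                  = List.foldl (pvB_emit d) [] p := by
                rw [List.foldl_append]
                simp [pvB_emit, hh'']
              rw [hfold]

-- ===== VERDICT (by name: the statement is the Claim_ definition above) =====
theorem parse_shell_subckts_from_spi_spec : Claim_equal_parse_shell_subckts_from_spi := by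
  intro text drop_pins _
  unfold Spec_parse_shell_subckts_from_spi
  unfold parse_shell_subckts_from_spi parse_shell_subckts_from_spi_alt
  rw [pv_main drop_pins (PySem.Str.splitlines text).length _ le_rfl [] (Or.inr rfl)]
  simp
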